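-- pv_equiv track=rewrite | github.com/sunshower1127/Challenges-in-Programmers | 유형별-정리/패턴파악/52.py | solution
-- ===== SOURCE A (Python) =====
-- def solution(nums):
--     result = []
--     for num in nums:
--         bin_str_arr = list("0" + bin(num)[2:])
--         for i in reversed(range(len(bin_str_arr))):
--             if bin_str_arr[i] == "0":
--                 bin_str_arr[i] = "1"
--                 if i + 1 < len(bin_str_arr):
--                     bin_str_arr[i + 1] = "0"
--                 break
--
--         result.append(int("".join(bin_str_arr), 2))
--     return result
-- ===== SOURCE B (Python) =====
-- def solution(nums):
--     result = []
--     for num in nums: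
--         n, j = num, 0
--         while n % 2 == 1:
--             n //= 2
--             j += 1
--         if j == 0:
--             result.append(n + 1)
--         else:
--             result.append((n + 1) * 2**j + 2**(j - 1) - 1)
--     return result
-- ===== Notes on version B (the rewrite author's own statement) =====
-- stated objective: alternative
-- what changed: Replaces A's per-number binary-string build, reverse index scan and int(...,2) re-parse with pure arithmetic: a halving loop strips the trailing one-bits (count j, remainder n), then the answer is the closed form (n+1)*2**j + 2**(j-1) - 1 (or n+1 when j=0); no strings are built.
-- outside the precondition, e.g. on solution([-1]): A returns [5], B does not finish within the time limit; on solution([-2]): A returns [3], B returns [-1]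
import Mathlib
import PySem

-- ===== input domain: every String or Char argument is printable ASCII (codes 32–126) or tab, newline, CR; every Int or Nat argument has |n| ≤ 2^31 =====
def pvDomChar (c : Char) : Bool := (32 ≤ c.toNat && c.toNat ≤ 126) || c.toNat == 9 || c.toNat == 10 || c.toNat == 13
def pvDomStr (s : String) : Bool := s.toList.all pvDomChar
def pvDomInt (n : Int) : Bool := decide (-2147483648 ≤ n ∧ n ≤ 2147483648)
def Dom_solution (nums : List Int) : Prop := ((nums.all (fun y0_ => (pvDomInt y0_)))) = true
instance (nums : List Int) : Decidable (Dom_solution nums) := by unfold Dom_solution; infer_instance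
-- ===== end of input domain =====

-- B replaces A's per-number binary-string build/scan/reparse by pure arithmetic
-- (strip trailing one-bits by halving, then a closed-form combination); return
-- values agree on all lists of nonnegative ints (Pre_).

-- ===== PORT A =====
-- bin(num)[2:] for num ≥ 0, as a list of chars (MSB first); Python builds the
-- digits by the same repeated division.  Negative num (where Python's bin gives
-- '-0b…' and A edits that string) is outside Pre_solution.
def pybin (n : Nat) : List Char :=
  if n < 2 then [if n == 1 then '1' else '0']
  else pybin (n / 2) ++ [if n % 2 == 1 then '1' else '0']

-- int(s, 2) on a string of '0'/'1' chars (all strings A joins are of this form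
-- for num ≥ 0)
def binStep (a : Nat) (c : Char) : Nat := 2 * a + (if c == '1' then 1 else 0)
def parseBin (cs : List Char) : Nat := cs.foldl binStep 0

-- the inner 'for i in reversed(range(len(arr))): if arr[i]=="0": … break':
-- fuel k means the next index to test is k-1; indices stay in range throughout.
def findEdit (arr : List Char) : Nat → List Char
  | 0 => arr
  | i + 1 =>
    if arr.getD i ' ' == '0' then
      if i + 1 < arr.length then (arr.set i '1').set (i + 1) '0'
      else arr.set i '1'
    else findEdit arr i

def solution (nums : List Int) : List Int :=
  nums.map (fun num =>
    let arr := '0' :: pybin num.toNat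
    ((parseBin (findEdit arr arr.length) : Nat) : Int))

-- ===== PORT B =====
-- the 'while n % 2 == 1: n //= 2; j += 1' loop; fuel only makes it total
-- (inside Pre_ the loop runs at most num+1 times)
def stripOnes : Nat → Int → Nat → Int × Nat
  | 0, n, j => (n, j)
  | f + 1, n, j =>
    if PySem.Int.mod n 2 == 1 then stripOnes f (PySem.Int.floordiv n 2) (j + 1)
    else (n, j)

def solution_alt (nums : List Int) : List Int :=
  nums.map (fun num =>
    let p := stripOnes (num.natAbs + 1) num 0
    if p.2 = 0 then p.1 + 1
    else (p.1 + 1) * 2 ^ p.2 + 2 ^ (p.2 - 1) - 1)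

-- ===== PRECONDITION & SPEC =====
-- Pre_ restricts to the task's natural domain, lists of nonnegative ints: for a
-- negative num Python's bin() yields '-0b…', so A edits the characters of that
-- string and re-parses it (the 'b' acts as the 0b prefix or is overwritten),
-- an accidental value B's arithmetic does not reproduce (B loops on -1).
def Pre_solution (nums : List Int) : Prop := ∀ n ∈ nums, 0 ≤ n
instance (nums : List Int) : Decidable (Pre_solution nums) := by unfold Pre_solution; infer_instance
def pvWitness_solution : List Int := [0, 1, 5, 12, 2147483647]

def Spec_solution (nums : List Int) (out : List Int) : Prop := out = solution_alt nums
instance (nums : List Int) (out : List Int) : Decidable (Spec_solution nums out) := by unfold Spec_solution; infer_instance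

-- ===== CLAIM (what is proved, stated in full; the proofs are below) =====
def Claim_equal_solution : Prop := ∀ (nums : List Int), Dom_solution nums → Pre_solution nums → Spec_solution nums (solution nums)

-- ===== LEMMAS AND PROOFS =====

-- number of trailing one-bits
def tto (m : Nat) : Nat :=
  if h : m % 2 = 1 then tto (m / 2) + 1 else 0
decreasing_by exact Nat.div_lt_self (by omega) (by omega)

theorem tto_even {m : Nat} (h : m % 2 = 0) : tto m = 0 := by
  rw [tto]; simp [h]

theorem tto_odd {m : Nat} (h : m % 2 = 1) : tto m = tto (m / 2) + 1 := by
  rw [tto]; simp [h]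

theorem tto_le (m : Nat) : tto m ≤ m := by
  induction m using Nat.strong_induction_on with
  | _ m ih =>
    by_cases h : m % 2 = 1
    · rw [tto_odd h]
      have hm : 1 ≤ m := by omega
      have := ih (m / 2) (Nat.div_lt_self (by omega) (by omega))
      omega
    · rw [tto_even (by omega)]; omega

theorem parseBin_append_one (ys : List Char) :
    parseBin (ys ++ ['1']) = 2 * parseBin ys + 1 := by
  simp [parseBin, List.foldl_append, binStep]

theorem foldl_binStep_replicate_one (r : Nat) (a : Nat) :
    List.foldl binStep a (List.replicate r '1') = a * 2 ^ r + (2 ^ r - 1) := by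
  induction r generalizing a with
  | zero => simp
  | succ r ih =>
    rw [List.replicate_succ, List.foldl_cons,
      show binStep a '1' = 2 * a + 1 from by simp [binStep], ih]
    have h1 : (1:Nat) ≤ 2 ^ r := Nat.one_le_two_pow
    have h2 : (1:Nat) ≤ 2 ^ (r + 1) := Nat.one_le_two_pow
    zify [h1, h2]
    ring

theorem parseBin_pybin (m : Nat) : parseBin (pybin m) = m := by
  induction m using Nat.strong_induction_on with
  | _ m ih =>
    rw [pybin]
    by_cases h1 : m < 2
    · rw [if_pos h1]
      interval_cases m <;> simp [parseBin, binStep]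
    · rw [if_neg h1]
      have := ih (m / 2) (Nat.div_lt_self (by omega) (by omega))
      by_cases h : m % 2 = 1 <;>
        simp [parseBin, List.foldl_append, binStep, h, parseBin] at this ⊢ <;>
        rw [this] <;> omega

-- the decomposition of '0' :: bin digits of m: a prefix ys, then the lowest
-- zero bit, then the tto m trailing ones; ys encodes m / 2^(tto m) halved.
theorem pybin_decomp (m : Nat) :
    ∃ ys, '0' :: pybin m = ys ++ '0' :: List.replicate (tto m) '1' ∧
      2 * parseBin ys = m / 2 ^ tto m := by
  induction m using Nat.strong_induction_on with
  | _ m ih =>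
    by_cases h : m % 2 = 1
    · -- odd
      rw [tto_odd h]
      by_cases h1 : m < 2
      · -- m = 1
        have hm : m = 1 := by omega
        subst hm
        refine ⟨[], ?_, ?_⟩
        · simp [pybin, List.replicate, tto_even (m := 0) rfl]
        · simp [parseBin, tto_even (m := 0) rfl]
      · obtain ⟨ys, hys, hp⟩ := ih (m / 2) (Nat.div_lt_self (by omega) (by omega))
        refine ⟨ys, ?_, ?_⟩
        · rw [pybin, if_neg (by omega)]
          have : ((if m % 2 == 1 then '1' else '0') : Char) = '1' := by simp [h]
          rw [this]
          rw [show ('0' :: (pybin (m / 2) ++ ['1'])) = ('0' :: pybin (m / 2)) ++ ['1'] by simp]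
          rw [hys, List.replicate_succ' (n := tto (m / 2))]
          simp
        · rw [hp, pow_succ, Nat.div_div_eq_div_mul, Nat.mul_comm]
    · -- even
      have h0 : m % 2 = 0 := by omega
      rw [tto_even h0]
      by_cases h1 : m < 2
      · have hm : m = 0 := by omega
        subst hm
        exact ⟨['0'], by simp [pybin, List.replicate], by simp [parseBin, binStep]⟩
      · refine ⟨'0' :: pybin (m / 2), ?_, ?_⟩
        · rw [pybin, if_neg (by omega)]
          have : ((if m % 2 == 1 then '1' else '0') : Char) = '0' := by simp [h0]
          rw [this]
          simp [List.replicate]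
        · have : parseBin ('0' :: pybin (m / 2)) = parseBin (pybin (m / 2)) := by
            simp [parseBin, binStep]
          rw [this, parseBin_pybin]
          omega

-- the scan skips a region with no '0'
theorem findEdit_skip (arr : List Char) (t k : Nat)
    (h : ∀ i, k ≤ i → i < k + t → arr.getD i ' ' ≠ '0') :
    findEdit arr (k + t) = findEdit arr k := by
  induction t with
  | zero => rfl
  | succ t ih =>
    rw [show k + (t + 1) = (k + t) + 1 by omega, findEdit]
    rw [if_neg]
    · exact ih (fun i h1 h2 => h i h1 (by omega))
    · simpa using h (k + t) (by omega) (by omega)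

theorem set_append_add {α : Type} (ys zs : List α) (k : Nat) (d : α) :
    (ys ++ zs).set (ys.length + k) d = ys ++ zs.set k d := by
  induction ys with
  | nil => simp
  | cons y ys ih => simp [ih, Nat.succ_add]

-- what the scan does on ys ++ '0' :: replicate r '1'
theorem findEdit_spec (ys : List Char) (r : Nat) :
    findEdit (ys ++ '0' :: List.replicate r '1') (ys ++ '0' :: List.replicate r '1').length =
      ys ++ '1' :: (if r = 0 then [] else '0' :: List.replicate (r - 1) '1') := by
  set arr := ys ++ '0' :: List.replicate r '1' with harr
  have hlen : arr.length = ys.length + 1 + r := by simp [harr]; omega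
  have hskip : findEdit arr (ys.length + 1 + r) = findEdit arr (ys.length + 1) := by
    apply findEdit_skip
    intro i h1 h2
    have hi : arr[i]?.getD ' ' = '1' := by
      have hi : i - (ys.length + 1) < r := by omega
      rw [harr, List.getElem?_append_right (by omega)]
      rw [show i - ys.length = (i - (ys.length + 1)) + 1 by omega]
      simp [hi]
    simp [List.getD_eq_getElem?_getD, hi]
  rw [hlen, hskip, findEdit]
  have hget : arr[ys.length]?.getD ' ' = '0' := by
    rw [harr, List.getElem?_append_right (by omega)]
    simp
  rw [if_pos (by simp [List.getD_eq_getElem?_getD, hget])]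
  by_cases hr : r = 0
  · subst hr
    rw [if_neg (by rw [hlen]; omega)]
    rw [harr, show ys.length = ys.length + 0 by rfl, set_append_add]
    simp
  · rw [if_pos (by rw [hlen]; omega)]
    rw [harr, show ys.length = ys.length + 0 by rfl, set_append_add]
    rw [show ys.length + 0 + 1 = ys.length + 1 by rfl, set_append_add]
    simp only [List.set]
    rw [show r = (r - 1) + 1 by omega, List.replicate_succ]
    simp

-- closed form for A's per-element value, m ≥ 0
theorem stepA_closed (m : Nat) :
    parseBin (findEdit ('0' :: pybin m) ('0' :: pybin m).length) =
      if tto m = 0 then m + 1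
      else (m / 2 ^ tto m + 1) * 2 ^ tto m + (2 ^ (tto m - 1) - 1) := by
  obtain ⟨ys, hys, hp⟩ := pybin_decomp m
  rw [hys, findEdit_spec]
  by_cases hj : tto m = 0
  · rw [if_pos hj, if_pos hj, parseBin_append_one]
    simp [hj] at hp
    omega
  · rw [if_neg hj, if_neg hj]
    rw [show ('1' :: ('0' :: List.replicate (tto m - 1) '1')) =
          ['1', '0'] ++ List.replicate (tto m - 1) '1' from rfl, ← List.append_assoc]
    rw [parseBin, List.foldl_append, foldl_binStep_replicate_one]
    rw [show List.foldl binStep 0 (ys ++ ['1', '0']) = 2 * (2 * parseBin ys + 1) from by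
      simp [parseBin, List.foldl_append, binStep]]
    rw [hp]
    set x := 2 ^ (tto m - 1) with hx
    have h2 : 2 ^ tto m = 2 * x := by
      rw [show tto m = (tto m - 1) + 1 by omega, pow_succ, hx]; ring
    rw [h2]; ring_nf

-- B's loop strips exactly the tto m trailing ones
theorem stripOnes_spec (f : Nat) : ∀ (m : Nat) (j0 : Nat), tto m ≤ f →
    stripOnes f (↑m) j0 = (↑(m / 2 ^ tto m), j0 + tto m) := by
  induction f with
  | zero =>
    intro m j0 h
    have h0 : tto m = 0 := by omega
    rw [stripOnes, h0]
    simp [h0] at h ⊢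
  | succ f ih =>
    intro m j0 h
    rw [stripOnes]
    by_cases hm : m % 2 = 1
    · rw [if_pos]
      · rw [show PySem.Int.floordiv (↑m) 2 = ((m / 2 : Nat) : Int) by
            exact_mod_cast PySem.Int.floordiv_natCast m 2]
        rw [ih (m / 2) (j0 + 1) (by rw [tto_odd hm] at h; omega)]
        rw [tto_odd hm, pow_succ, Nat.div_div_eq_div_mul, Nat.mul_comm, Prod.mk.injEq]
        exact ⟨rfl, by omega⟩
      · rw [show PySem.Int.mod (↑m) 2 = ((m % 2 : Nat) : Int) by
            exact_mod_cast PySem.Int.mod_natCast m 2]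
        simp [hm]
    · rw [if_neg, tto_even (by omega)]
      · simp
      · rw [show PySem.Int.mod (↑m) 2 = ((m % 2 : Nat) : Int) by
            exact_mod_cast PySem.Int.mod_natCast m 2,
          show m % 2 = 0 by omega]
        simp

-- per-element agreement on nonnegative input
theorem step_eq (m : Nat) :
    ((parseBin (findEdit ('0' :: pybin m) ('0' :: pybin m).length) : Nat) : Int) =
      (let p := stripOnes ((↑m : Int).natAbs + 1) (↑m) 0
       if p.2 = 0 then p.1 + 1 else (p.1 + 1) * 2 ^ p.2 + 2 ^ (p.2 - 1) - 1) := by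
  have hfuel : tto m ≤ (↑m : Int).natAbs + 1 := by
    have := tto_le m; simp; omega
  rw [stepA_closed, stripOnes_spec ((↑m : Int).natAbs + 1) m 0 hfuel]
  by_cases hj : tto m = 0
  · simp [hj]
  · rw [if_neg hj]
    simp only [Nat.zero_add, if_neg hj]
    have h1 : (1:Nat) ≤ 2 ^ (tto m - 1) := Nat.one_le_two_pow
    push_cast [Nat.cast_sub h1]
    ring

-- ===== VERDICT (by name: the statement is the Claim_ definition above) =====
theorem solution_spec : Claim_equal_solution := by
  intro nums _ hpre
  show solution nums = solution_alt nums
  unfold solution solution_alt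
  apply List.map_congr_left
  intro num hmem
  have h0 : 0 ≤ num := hpre num hmem
  have hcast : (↑num.toNat : Int) = num := Int.toNat_of_nonneg h0
  calc ((parseBin (findEdit ('0' :: pybin num.toNat) ('0' :: pybin num.toNat).length) : Nat) : Int)
      = _ := step_eq num.toNat
    _ = _ := by rw [hcast]
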